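-- pv_equiv track=rewrite | github.com/SanayKrishna/CloudScanner | utils/cloudtrail_monitor.py | _extract_bucket_name
-- ===== SOURCE A (Python) =====
-- def _extract_bucket_name(event, cloud_trail_event):
--     """Extract bucket name from CloudTrail event"""
--     # Try to get from resources
--     resources = event.get('Resources', [])
--     for resource in resources:
--         if resource.get('ResourceType') == 'AWS::S3::Bucket':
--             return resource.get('ResourceName')
--
--     # Try to parse from request parameters
--     request_params = cloud_trail_event.get('requestParameters', {})
--     if 'bucketName' in request_params:
--         return request_params['bucketName']
--
--     # Try to parse from ARN in resources
--     for resource in resources: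
--         resource_name = resource.get('ResourceName', '')
--         if resource_name.startswith('arn:aws:s3:::'):
--             return resource_name.replace('arn:aws:s3:::', '').split('/')[0]
--
--     return None
-- ===== SOURCE B (Python) =====
-- def _extract_bucket_name(event, cloud_trail_event):
--     """Extract bucket name from CloudTrail event.
--
--     Single pass over resources collecting both candidates (first S3::Bucket
--     resource, first ARN-prefixed ResourceName), then one priority chain.
--     """
--     PFX = 'arn:aws:s3:::'
--     s3_hit = None    # (raw ResourceName,) of the first AWS::S3::Bucket resource
--     arn_hit = None   # first raw ResourceName starting with the ARN prefix
--     for resource in event.get('Resources', []):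
--         if s3_hit is None and resource.get('ResourceType') == 'AWS::S3::Bucket':
--             s3_hit = (resource.get('ResourceName'),)
--         name = resource.get('ResourceName', '')
--         if arn_hit is None and name.startswith(PFX):
--             arn_hit = name
--     if s3_hit is not None:
--         return s3_hit[0]
--     params = cloud_trail_event.get('requestParameters', {})
--     if 'bucketName' in params:
--         return params['bucketName']
--     if arn_hit is not None:
--         return arn_hit.replace(PFX, '').split('/')[0]
--     return None
-- ===== Notes on version B (the rewrite author's own statement) =====
-- stated objective: alternative
-- what changed: B replaces A's two separate scans of resources (one for an S3::Bucket ResourceType, a second for an ARN-prefixed ResourceName) with a single pass that accumulates both first-match candidates, deciding the S3/requestParameters/ARN priority chain only after the loop.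
import Mathlib
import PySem

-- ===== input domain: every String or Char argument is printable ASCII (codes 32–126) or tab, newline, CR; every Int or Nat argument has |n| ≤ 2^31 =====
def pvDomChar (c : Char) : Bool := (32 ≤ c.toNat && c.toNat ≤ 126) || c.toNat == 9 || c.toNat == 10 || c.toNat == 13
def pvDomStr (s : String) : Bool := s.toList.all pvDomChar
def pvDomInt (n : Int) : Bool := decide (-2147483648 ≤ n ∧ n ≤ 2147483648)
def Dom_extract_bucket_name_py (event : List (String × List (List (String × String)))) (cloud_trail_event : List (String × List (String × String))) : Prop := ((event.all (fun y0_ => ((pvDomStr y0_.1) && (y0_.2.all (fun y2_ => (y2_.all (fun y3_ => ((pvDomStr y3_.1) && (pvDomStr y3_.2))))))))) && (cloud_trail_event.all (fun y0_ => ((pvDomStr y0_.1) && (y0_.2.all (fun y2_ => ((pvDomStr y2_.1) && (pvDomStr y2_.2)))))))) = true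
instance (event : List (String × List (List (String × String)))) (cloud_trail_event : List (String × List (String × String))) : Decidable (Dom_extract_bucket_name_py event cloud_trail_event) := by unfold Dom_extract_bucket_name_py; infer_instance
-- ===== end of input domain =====

-- ===== PORT A =====
-- B changes only the traversal (one pass with two candidates instead of two scans); return-value equivalence on Dom.
-- faithfulness note: Python's split('/') never yields an empty list, so the [0] index is ported as headD "".
def aLoop1 : List (List (String × String)) → Option (Option String)
  | [] => none
  | r :: rest =>
      if ((PySem.Dict.mk r).get? "ResourceType" == some "AWS::S3::Bucket")
      then some ((PySem.Dict.mk r).get? "ResourceName")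
      else aLoop1 rest

def aLoop2 : List (List (String × String)) → Option String
  | [] => none
  | r :: rest =>
      let name := (PySem.Dict.mk r).getD "ResourceName" ""
      if PySem.Str.startswith name "arn:aws:s3:::"
      then some ((((PySem.Str.split? (PySem.Str.replace name "arn:aws:s3:::" "") "/").getD []).headD ""))
      else aLoop2 rest

def extract_bucket_name_py (event : List (String × List (List (String × String)))) (cloud_trail_event : List (String × List (String × String))) : Option String :=
  let resources := (PySem.Dict.mk event).getD "Resources" []
  match aLoop1 resources with
  | some v => v
  | none =>
      let request_params := PySem.Dict.mk ((PySem.Dict.mk cloud_trail_event).getD "requestParameters" [])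
      match request_params.get? "bucketName" with
      | some v => some v
      | none => aLoop2 resources

-- ===== PORT B =====
-- one pass: accumulate first S3::Bucket hit (s3) and first ARN-prefixed ResourceName (arn)
def altScan : List (List (String × String)) → Option (Option String) → Option String → Option (Option String) × Option String
  | [], s3, arn => (s3, arn)
  | r :: rest, s3, arn =>
      let d := PySem.Dict.mk r
      let s3' := if s3.isNone && (d.get? "ResourceType" == some "AWS::S3::Bucket")
                 then some (d.get? "ResourceName") else s3
      let name := d.getD "ResourceName" ""
      let arn' := if arn.isNone && PySem.Str.startswith name "arn:aws:s3:::"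
                  then some name else arn
      altScan rest s3' arn'

def extract_bucket_name_py_alt (event : List (String × List (List (String × String)))) (cloud_trail_event : List (String × List (String × String))) : Option String :=
  let resources := (PySem.Dict.mk event).getD "Resources" []
  let hits := altScan resources none none
  match hits.1 with
  | some v => v
  | none =>
      let params := PySem.Dict.mk ((PySem.Dict.mk cloud_trail_event).getD "requestParameters" [])
      match params.get? "bucketName" with
      | some v => some v
      | none =>
          match hits.2 with
          | some name => some ((((PySem.Str.split? (PySem.Str.replace name "arn:aws:s3:::" "") "/").getD []).headD ""))
          | none => none

-- ===== PRECONDITION & SPEC =====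
def Spec_extract_bucket_name_py (event : List (String × List (List (String × String)))) (cloud_trail_event : List (String × List (String × String))) (out : Option String) : Prop := out = extract_bucket_name_py_alt event cloud_trail_event
instance (event : List (String × List (List (String × String)))) (cloud_trail_event : List (String × List (String × String))) (out : Option String) : Decidable (Spec_extract_bucket_name_py event cloud_trail_event out) := by unfold Spec_extract_bucket_name_py; infer_instance

-- ===== CLAIM (what is proved, stated in full; the proofs are below) =====
def Claim_equal_extract_bucket_name_py : Prop := ∀ (event : List (String × List (List (String × String)))) (cloud_trail_event : List (String × List (String × String))), Dom_extract_bucket_name_py event cloud_trail_event → Spec_extract_bucket_name_py event cloud_trail_event (extract_bucket_name_py event cloud_trail_event)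

-- ===== LEMMAS AND PROOFS =====
-- first raw ResourceName with the ARN prefix (proof-side characterisation of altScan's second component)
def rawArn : List (List (String × String)) → Option String
  | [] => none
  | r :: rest =>
      let name := (PySem.Dict.mk r).getD "ResourceName" ""
      if PySem.Str.startswith name "arn:aws:s3:::" then some name else rawArn rest

theorem altScan_spec (res : List (List (String × String))) : ∀ (s3 : Option (Option String)) (arn : Option String),
    altScan res s3 arn = ((if s3.isSome then s3 else aLoop1 res), (if arn.isSome then arn else rawArn res)) := by
  induction res with
  | nil => intro s3 arn; cases s3 <;> cases arn <;> simp [altScan, aLoop1, rawArn]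
  | cons r rest ih =>
      intro s3 arn
      simp only [altScan, ih]
      cases s3 <;> cases arn <;>
        simp only [aLoop1, rawArn, Option.isNone_none, Option.isNone_some, Option.isSome_none,
          Option.isSome_some, Bool.true_and, Bool.false_and, if_true, if_false] <;>
        cases hc : ((PySem.Dict.mk r).get? "ResourceType" == some "AWS::S3::Bucket") <;>
        cases hd : PySem.Str.startswith ((PySem.Dict.mk r).getD "ResourceName" "") "arn:aws:s3:::" <;>
        simp [hc, hd]

theorem aLoop2_eq_rawArn (res : List (List (String × String))) :
    aLoop2 res = (rawArn res).map (fun name => (((PySem.Str.split? (PySem.Str.replace name "arn:aws:s3:::" "") "/").getD []).headD "")) := by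
  induction res with
  | nil => simp [aLoop2, rawArn]
  | cons r rest ih =>
      simp only [aLoop2, rawArn]
      split <;> simp [ih]

-- ===== VERDICT (by name: the statement is the Claim_ definition above) =====
theorem extract_bucket_name_py_spec : Claim_equal_extract_bucket_name_py := by
  intro event cloud_trail_event _
  unfold Spec_extract_bucket_name_py extract_bucket_name_py extract_bucket_name_py_alt
  simp only [altScan_spec, Option.isSome_none, if_false, Bool.false_eq_true]
  cases h1 : aLoop1 ((PySem.Dict.mk event).getD "Resources" []) <;>
    simp only [] <;>
    cases h2 : (PySem.Dict.mk ((PySem.Dict.mk cloud_trail_event).getD "requestParameters" [])).get? "bucketName" <;>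
    simp only [aLoop2_eq_rawArn] <;>
    cases h3 : rawArn ((PySem.Dict.mk event).getD "Resources" []) <;> rfl
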